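-- pv_equiv track=rewrite | github.com/Allenmylath/pipecat-supervisor | bot-schedule.py | determine_department
-- ===== SOURCE A (Python) =====
-- def determine_department(visit_reason):
--     """Determine appropriate department based on visit reason"""
--     reason_lower = visit_reason.lower()
--
--     # Simple keyword matching - could be made more sophisticated
--     if any(word in reason_lower for word in ['heart', 'chest pain', 'blood pressure']):
--         return 'Cardiology'
--     elif any(word in reason_lower for word in ['bone', 'joint', 'back pain', 'muscle']):
--         return 'Orthopedics'
--     elif any(word in reason_lower for word in ['child', 'kid', 'baby']):
--         return 'Pediatrics'
--     else:
--         return 'General Medicine'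
-- ===== SOURCE B (Python) =====
-- KEYWORD_PRIORITY = {
--     'heart': 0, 'chest pain': 0, 'blood pressure': 0,
--     'bone': 1, 'joint': 1, 'back pain': 1, 'muscle': 1,
--     'child': 2, 'kid': 2, 'baby': 2,
-- }
-- DEPARTMENTS = ('Cardiology', 'Orthopedics', 'Pediatrics', 'General Medicine')
--
--
-- def determine_department(visit_reason):
--     """Determine appropriate department based on visit reason"""
--     s = visit_reason.lower()
--     best = len(DEPARTMENTS) - 1
--     for i in range(len(s)):
--         for kw, p in KEYWORD_PRIORITY.items():
--             if s.startswith(kw, i):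
--                 best = min(best, p)
--     return DEPARTMENTS[best]
-- ===== Notes on version B (the rewrite author's own statement) =====
-- stated objective: alternative
-- what changed: Instead of an if/elif cascade of per-group substring membership tests, B scans the lowered text once position by position, testing prefix matches against a keyword-to-priority dict and keeping the minimum matched priority, then indexes a department table with it; it trades the fast built-in substring search for a uniform single scan.
import Mathlib
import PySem

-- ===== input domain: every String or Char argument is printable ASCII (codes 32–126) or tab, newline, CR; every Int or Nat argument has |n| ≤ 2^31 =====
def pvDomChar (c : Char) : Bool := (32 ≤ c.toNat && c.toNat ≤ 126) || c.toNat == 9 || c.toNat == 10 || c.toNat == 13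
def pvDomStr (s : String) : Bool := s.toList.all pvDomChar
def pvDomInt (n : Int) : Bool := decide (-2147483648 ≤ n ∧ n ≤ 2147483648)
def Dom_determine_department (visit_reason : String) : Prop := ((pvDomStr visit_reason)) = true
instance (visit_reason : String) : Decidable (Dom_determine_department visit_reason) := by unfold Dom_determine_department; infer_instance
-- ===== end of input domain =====

-- B replaces A's if/elif cascade of substring tests by a single positional scan of the lowered
-- text with prefix tests against a keyword→priority table, keeping the minimum matched priority
-- (objective: alternative, same asymptotic cost).

-- ===== PORT A =====
def determine_department (visit_reason : String) : String :=
  let reason_lower := PySem.Str.lower visit_reason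
  if ["heart", "chest pain", "blood pressure"].any (fun word => PySem.Str.isIn word reason_lower) then
    "Cardiology"
  else if ["bone", "joint", "back pain", "muscle"].any (fun word => PySem.Str.isIn word reason_lower) then
    "Orthopedics"
  else if ["child", "kid", "baby"].any (fun word => PySem.Str.isIn word reason_lower) then
    "Pediatrics"
  else
    "General Medicine"

-- ===== PORT B =====
-- KEYWORD_PRIORITY dict (association list, insertion order)
def kwPriority : List (String × Nat) :=
  [("heart", 0), ("chest pain", 0), ("blood pressure", 0),
   ("bone", 1), ("joint", 1), ("back pain", 1), ("muscle", 1),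
   ("child", 2), ("kid", 2), ("baby", 2)]

-- DEPARTMENTS tuple
def departments : List String :=
  ["Cardiology", "Orthopedics", "Pediatrics", "General Medicine"]

-- inner loop body: `for kw, p in KEYWORD_PRIORITY.items(): if s.startswith(kw, i): best = min(best, p)`
-- Python's s.startswith(kw, i) with 0 ≤ i ≤ len(s) is exactly a prefix test on the chars dropped by i.
def ddStep (chars : List Char) (best : Nat) (i : Nat) : Nat :=
  kwPriority.foldl
    (fun b kp => if PySem.Chars.startswith (chars.drop i) kp.1.toList then min b kp.2 else b) best

def determine_department_alt (visit_reason : String) : String :=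
  let chars := (PySem.Str.lower visit_reason).toList
  let best := (List.range chars.length).foldl (ddStep chars) (departments.length - 1)
  departments.getD best "General Medicine"

-- ===== PRECONDITION & SPEC =====
def Spec_determine_department (visit_reason : String) (out : String) : Prop := out = determine_department_alt visit_reason
instance (visit_reason : String) (out : String) : Decidable (Spec_determine_department visit_reason out) := by unfold Spec_determine_department; infer_instance

-- ===== CLAIM (what is proved, stated in full; the proofs are below) =====
def Claim_equal_determine_department : Prop := ∀ (visit_reason : String), Dom_determine_department visit_reason → Spec_determine_department visit_reason (determine_department visit_reason)

-- ===== LEMMAS AND PROOFS =====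

-- inner fold never increases the accumulator
lemma inner_le (t : List Char) (kws : List (String × Nat)) (b : Nat) :
    kws.foldl (fun b kp => if PySem.Chars.startswith t kp.1.toList then min b kp.2 else b) b ≤ b := by
  induction kws generalizing b with
  | nil => simp
  | cons kp rest ih =>
      simp only [List.foldl_cons]
      refine le_trans (ih _) ?_
      split <;> omega

-- if some table entry's keyword matches at this position, the inner fold is ≤ its priority
lemma inner_reach (t : List Char) (kp : String × Nat)
    (hsw : PySem.Chars.startswith t kp.1.toList = true) :
    ∀ (kws : List (String × Nat)) (b : Nat), kp ∈ kws →
    kws.foldl (fun b kp => if PySem.Chars.startswith t kp.1.toList then min b kp.2 else b) b ≤ kp.2 := by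
  intro kws
  induction kws with
  | nil => intro b h; cases h
  | cons hd rest ih =>
      intro b hmem
      simp only [List.foldl_cons]
      rcases List.mem_cons.mp hmem with h | h
      · subst h
        refine le_trans (inner_le _ _ _) ?_
        rw [if_pos hsw]; omega
      · exact ih _ h

-- the inner fold's value is the start value or some matched entry's priority
lemma inner_origin (t : List Char) (kws : List (String × Nat)) (b : Nat) :
    kws.foldl (fun b kp => if PySem.Chars.startswith t kp.1.toList then min b kp.2 else b) b = b ∨
    ∃ kp ∈ kws, PySem.Chars.startswith t kp.1.toList = true ∧
      kws.foldl (fun b kp => if PySem.Chars.startswith t kp.1.toList then min b kp.2 else b) b = kp.2 := by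
  induction kws generalizing b with
  | nil => left; rfl
  | cons hd rest ih =>
      simp only [List.foldl_cons]
      by_cases hsw : PySem.Chars.startswith t hd.1.toList = true
      · rw [if_pos hsw]
        rcases ih (min b hd.2) with h | ⟨kp, hm, hs, he⟩
        · rcases Nat.le_total b hd.2 with hle | hle
          · left; rw [h]; omega
          · right; exact ⟨hd, List.mem_cons_self .., hsw, by rw [h]; omega⟩
        · right; exact ⟨kp, List.mem_cons_of_mem _ hm, hs, he⟩
      · rw [if_neg hsw]
        rcases ih b with h | ⟨kp, hm, hs, he⟩
        · left; exact h
        · right; exact ⟨kp, List.mem_cons_of_mem _ hm, hs, he⟩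

lemma outer_le (chars : List Char) (L : List Nat) (b : Nat) :
    L.foldl (ddStep chars) b ≤ b := by
  induction L generalizing b with
  | nil => simp
  | cons j rest ih =>
      simp only [List.foldl_cons]
      exact le_trans (ih _) (inner_le _ _ _)

lemma outer_reach (chars : List Char) (kp : String × Nat) (hkp : kp ∈ kwPriority)
    (i : Nat) (hsw : PySem.Chars.startswith (chars.drop i) kp.1.toList = true) :
    ∀ (L : List Nat) (b : Nat), i ∈ L → L.foldl (ddStep chars) b ≤ kp.2 := by
  intro L
  induction L with
  | nil => intro b h; cases h
  | cons j rest ih =>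
      intro b hi
      simp only [List.foldl_cons]
      rcases List.mem_cons.mp hi with h | h
      · subst h
        exact le_trans (outer_le _ _ _) (inner_reach _ kp hsw _ _ hkp)
      · exact ih _ h

lemma outer_origin (chars : List Char) (L : List Nat) (b : Nat) :
    L.foldl (ddStep chars) b = b ∨
    ∃ i ∈ L, ∃ kp ∈ kwPriority, PySem.Chars.startswith (chars.drop i) kp.1.toList = true ∧
      L.foldl (ddStep chars) b = kp.2 := by
  induction L generalizing b with
  | nil => left; rfl
  | cons j rest ih =>
      simp only [List.foldl_cons]
      rcases ih (ddStep chars b j) with h | ⟨i, hi, kp, hkp, hs, he⟩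
      · rw [h]
        rcases inner_origin (chars.drop j) kwPriority b with h2 | ⟨kp, hkp, hs, he⟩
        · left; exact h2
        · right; exact ⟨j, List.mem_cons_self .., kp, hkp, hs, he⟩
      · right; exact ⟨i, List.mem_cons_of_mem _ hi, kp, hkp, hs, he⟩

-- a nonempty keyword occurs as a substring iff it is a prefix at some in-range position
lemma isIn_iff_exists_range (chars : List Char) (kw : List Char) (hne : kw ≠ []) :
    PySem.Chars.isIn kw chars = true ↔
    ∃ i ∈ List.range chars.length, PySem.Chars.startswith (chars.drop i) kw = true := by
  constructor
  · intro h
    rcases (PySem.Chars.exists_prefix_drop_iff_isIn kw chars).mpr h with ⟨j, hj⟩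
    by_cases hlt : j < chars.length
    · exact ⟨j, List.mem_range.mpr hlt, (PySem.Chars.startswith_iff _ _).mpr hj⟩
    · exfalso
      rw [List.drop_eq_nil_of_le (by omega)] at hj
      exact hne (List.prefix_nil.mp hj)
  · rintro ⟨i, _, hsw⟩
    exact (PySem.Chars.exists_prefix_drop_iff_isIn kw chars).mp
      ⟨i, (PySem.Chars.startswith_iff _ _).mp hsw⟩

lemma kw_nonempty : ∀ kp ∈ kwPriority, kp.1.toList ≠ [] := by decide

lemma r_le (chars : List Char) (kp : String × Nat) (hkp : kp ∈ kwPriority)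
    (hin : PySem.Chars.isIn kp.1.toList chars = true) :
    (List.range chars.length).foldl (ddStep chars) 3 ≤ kp.2 := by
  rcases (isIn_iff_exists_range chars kp.1.toList (kw_nonempty kp hkp)).mp hin with ⟨i, hi, hsw⟩
  exact outer_reach chars kp hkp i hsw _ _ hi

lemma r_cases (chars : List Char) :
    (List.range chars.length).foldl (ddStep chars) 3 = 3 ∨
    ∃ kp ∈ kwPriority, PySem.Chars.isIn kp.1.toList chars = true ∧
      (List.range chars.length).foldl (ddStep chars) 3 = kp.2 := by
  rcases outer_origin chars (List.range chars.length) 3 with h | ⟨i, hi, kp, hkp, hsw, he⟩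
  · left; exact h
  · exact Or.inr ⟨kp, hkp, (isIn_iff_exists_range chars kp.1.toList (kw_nonempty kp hkp)).mpr
      ⟨i, hi, hsw⟩, he⟩

-- ===== VERDICT (by name: the statement is the Claim_ definition above) =====
theorem determine_department_spec : Claim_equal_determine_department := by
  intro visit_reason _
  unfold Spec_determine_department determine_department determine_department_alt
  simp only [List.any_cons, List.any_nil, Bool.or_false, PySem.Str.isIn_eq]
  set chars := (PySem.Str.lower visit_reason).toList with hchars
  have hlen : departments.length - 1 = 3 := by decide
  rw [hlen]
  set r := (List.range chars.length).foldl (ddStep chars) 3 with hr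
  clear_value r
  by_cases h0 : (PySem.Chars.isIn "heart".toList chars || (PySem.Chars.isIn "chest pain".toList chars
      || PySem.Chars.isIn "blood pressure".toList chars)) = true
  · rw [if_pos h0]
    have hr0 : r = 0 := by
      have : r ≤ 0 := by
        rw [hr]
        rcases Bool.or_eq_true .. ▸ h0 with h | h
        · exact r_le chars ("heart", 0) (by decide) h
        rcases Bool.or_eq_true .. ▸ h with h | h
        · exact r_le chars ("chest pain", 0) (by decide) h
        · exact r_le chars ("blood pressure", 0) (by decide) h
      omega
    rw [hr0]; rfl
  · rw [if_neg h0]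
    simp only [Bool.or_eq_true, not_or, Bool.not_eq_true] at h0
    obtain ⟨f1, f2, f3⟩ := h0
    by_cases h1 : (PySem.Chars.isIn "bone".toList chars || (PySem.Chars.isIn "joint".toList chars
        || (PySem.Chars.isIn "back pain".toList chars || PySem.Chars.isIn "muscle".toList chars))) = true
    · rw [if_pos h1]
      have hle : r ≤ 1 := by
        rw [hr]
        rcases Bool.or_eq_true .. ▸ h1 with h | h
        · exact r_le chars ("bone", 1) (by decide) h
        rcases Bool.or_eq_true .. ▸ h with h | h
        · exact r_le chars ("joint", 1) (by decide) h
        rcases Bool.or_eq_true .. ▸ h with h | h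
        · exact r_le chars ("back pain", 1) (by decide) h
        · exact r_le chars ("muscle", 1) (by decide) h
      have hr1 : r = 1 := by
        rcases r_cases chars with h | ⟨kp, hkp, hin, he⟩
        · omega
        · rw [← hr] at he
          simp only [kwPriority, List.mem_cons, List.not_mem_nil, or_false] at hkp
          rcases hkp with rfl | rfl | rfl | rfl | rfl | rfl | rfl | rfl | rfl | rfl <;>
            simp only at hin he <;> first
              | (rw [f1] at hin; cases hin)
              | (rw [f2] at hin; cases hin)
              | (rw [f3] at hin; cases hin)
              | omega
      rw [hr1]; rfl
    · rw [if_neg h1]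
      simp only [Bool.or_eq_true, not_or, Bool.not_eq_true] at h1
      obtain ⟨g1, g2, g3, g4⟩ := h1
      by_cases h2 : (PySem.Chars.isIn "child".toList chars || (PySem.Chars.isIn "kid".toList chars
          || PySem.Chars.isIn "baby".toList chars)) = true
      · rw [if_pos h2]
        have hle : r ≤ 2 := by
          rw [hr]
          rcases Bool.or_eq_true .. ▸ h2 with h | h
          · exact r_le chars ("child", 2) (by decide) h
          rcases Bool.or_eq_true .. ▸ h with h | h
          · exact r_le chars ("kid", 2) (by decide) h
          · exact r_le chars ("baby", 2) (by decide) h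
        have hr2 : r = 2 := by
          rcases r_cases chars with h | ⟨kp, hkp, hin, he⟩
          · omega
          · rw [← hr] at he
            simp only [kwPriority, List.mem_cons, List.not_mem_nil, or_false] at hkp
            rcases hkp with rfl | rfl | rfl | rfl | rfl | rfl | rfl | rfl | rfl | rfl <;>
              simp only at hin he <;> first
                | (rw [f1] at hin; cases hin)
                | (rw [f2] at hin; cases hin)
                | (rw [f3] at hin; cases hin)
                | (rw [g1] at hin; cases hin)
                | (rw [g2] at hin; cases hin)
                | (rw [g3] at hin; cases hin)
                | (rw [g4] at hin; cases hin)
                | omega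
        rw [hr2]; rfl
      · rw [if_neg h2]
        simp only [Bool.or_eq_true, not_or, Bool.not_eq_true] at h2
        obtain ⟨k1, k2, k3⟩ := h2
        have hr3 : r = 3 := by
          rcases r_cases chars with h | ⟨kp, hkp, hin, he⟩
          · rw [← hr] at h; exact h
          · rw [← hr] at he
            simp only [kwPriority, List.mem_cons, List.not_mem_nil, or_false] at hkp
            rcases hkp with rfl | rfl | rfl | rfl | rfl | rfl | rfl | rfl | rfl | rfl <;>
              simp only at hin he <;> first
                | (rw [f1] at hin; cases hin)
                | (rw [f2] at hin; cases hin)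
                | (rw [f3] at hin; cases hin)
                | (rw [g1] at hin; cases hin)
                | (rw [g2] at hin; cases hin)
                | (rw [g3] at hin; cases hin)
                | (rw [g4] at hin; cases hin)
                | (rw [k1] at hin; cases hin)
                | (rw [k2] at hin; cases hin)
                | (rw [k3] at hin; cases hin)
        rw [hr3]; rfl
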